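-- pv_equiv track=rewrite | github.com/evendrow/somoformer | src/utils/data.py | valid_tracks_for_sequence
-- ===== SOURCE A (Python) =====
-- def tracks_for_sequence(annotations):
--     """ For a list annotations, creates a dictionary of tracks, each
--         corresponding to a list of annotations within that track
--     """
--     tracks = {}
--     for frame in annotations:
--         if frame['num_keypoints'] == 0:
--             continue
--         if frame['track_id'] not in tracks:
--             tracks[frame['track_id']] = []
--         tracks[frame['track_id']].append(frame)
--     return tracks
--
-- def valid_tracks_for_sequence(annotations):
--     """ For a list annotations, creates a dictionary of tracks, each
--         corresponding to a list of annotations within that track.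
--
--         We additionally filter tracks to make sure that each track is
--         strictly consecutive, so that there are no frame jumps.
--
--     """
--     tracks = tracks_for_sequence(annotations)
--     valid_tracks = {}
--
--     for track_id, track in tracks.items():
--         # We check if the track id list is a list of consecutive integers
--         # If not, we discard it. This is maybe not the most efficient thing
--         # to do, but it's simple. Experimentally, 3773 / 3839 tracks are
--         # consecutive, so we're not losing much anyway.
--         all_image_ids = [frame['rel_image_id'] for frame in track]
--         if (
--             len(all_image_ids) == len(set(all_image_ids)) and          # ensure uniqueness
--             all_image_ids == sorted(all_image_ids) and                 # ensure sortedness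
--             len(all_image_ids) == all_image_ids[-1]-all_image_ids[0]+1 # ensure consecutivity
--            ):
--             valid_tracks[track_id] = track
--     return valid_tracks
-- ===== SOURCE B (Python) =====
-- def valid_tracks_for_sequence(annotations):
--     """Group annotations into tracks by track_id (skipping frames with
--     num_keypoints == 0), then keep only tracks whose rel_image_id values
--     form a strictly consecutive run, checked by one scan over adjacent
--     pairs instead of set/sort/span arithmetic."""
--     tracks = {}
--     for frame in annotations:
--         if frame['num_keypoints'] == 0:
--             continue
--         tracks.setdefault(frame['track_id'], []).append(frame)
--     return {
--         tid: track
--         for tid, track in tracks.items()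
--         if all(b == a + 1 for a, b in zip(
--             (f['rel_image_id'] for f in track),
--             (f['rel_image_id'] for f in track[1:])))
--     }
-- ===== Notes on version B (the rewrite author's own statement) =====
-- stated objective: simpler
-- what changed: The per-track validity test (set-uniqueness + full sort + last-first+1 span arithmetic) is replaced by a single linear scan over adjacent rel_image_id pairs checking ids[i+1] == ids[i]+1, and the grouping/filtering is expressed with setdefault and a dict comprehension.
import Mathlib
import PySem

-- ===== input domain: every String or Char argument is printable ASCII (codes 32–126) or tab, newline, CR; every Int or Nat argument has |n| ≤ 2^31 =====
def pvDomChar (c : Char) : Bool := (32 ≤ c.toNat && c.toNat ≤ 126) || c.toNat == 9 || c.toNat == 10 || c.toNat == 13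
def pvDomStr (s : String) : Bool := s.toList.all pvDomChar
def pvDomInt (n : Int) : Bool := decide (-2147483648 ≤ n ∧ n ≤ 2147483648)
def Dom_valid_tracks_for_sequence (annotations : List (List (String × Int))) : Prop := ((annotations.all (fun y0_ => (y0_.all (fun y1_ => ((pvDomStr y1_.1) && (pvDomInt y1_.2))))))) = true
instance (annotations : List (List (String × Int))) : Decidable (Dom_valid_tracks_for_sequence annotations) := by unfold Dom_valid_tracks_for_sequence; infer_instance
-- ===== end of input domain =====

-- B replaces A's per-track set/sort/span validity test by one linear scan over
-- adjacent rel_image_id pairs, and builds the result by filtering (objective: simpler).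
-- Note: the equivalence is about the RETURN value; neither program mutates its argument.

-- ===== PORT A =====

-- frame['k'] : first-match association-list lookup (a Python dict has unique keys;
-- the default 0 is never consulted on inputs admitted by Pre_).
def pvFGet (frame : List (String × Int)) (k : String) : Int :=
  (PySem.Dict.mk frame).getD k 0

-- helper tracks_for_sequence, transliterated ('if tid not in tracks: tracks[tid] = []'
-- followed by append is Dict.modify with default [])
def pvTracksFor (annotations : List (List (String × Int))) :
    PySem.Dict Int (List (List (String × Int))) :=
  annotations.foldl
    (fun tracks frame =>
      if pvFGet frame "num_keypoints" == 0 then tracks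
      else tracks.modify (pvFGet frame "track_id") [] (fun t => t ++ [frame]))
    PySem.Dict.empty

-- A's validity test: uniqueness (len == len(set)), sortedness (ids == sorted(ids)),
-- consecutivity (len == ids[-1]-ids[0]+1).  pyGet? none = IndexError (unreachable:
-- tracks are built by appends, so never empty).
def pvCheckA (ids : List Int) : Bool :=
  (ids.length == (PySem.Set.ofList ids).length) &&
  (ids == PySem.List.sorted ids (fun x => x)) &&
  (match PySem.List.pyGet? ids (-1), PySem.List.pyGet? ids 0 with
   | some last, some head => ((ids.length : Int) == last - head + 1)
   | _, _ => false)

def valid_tracks_for_sequence (annotations : List (List (String × Int))) :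
    List (Int × List (List (String × Int))) :=
  ((pvTracksFor annotations).items.foldl
    (fun valid p =>
      if pvCheckA (p.2.map (fun frame => pvFGet frame "rel_image_id"))
      then valid.insert p.1 p.2 else valid)
    PySem.Dict.empty).items

-- ===== PORT B =====

-- grouping pass of Source B: tracks.setdefault(tid, []).append(frame)
def pvTracksAlt (annotations : List (List (String × Int))) :
    PySem.Dict Int (List (List (String × Int))) :=
  annotations.foldl
    (fun tracks frame =>
      if pvFGet frame "num_keypoints" == 0 then tracks
      else
        let tid := pvFGet frame "track_id"
        (tracks.setdefault tid []).modify tid [] (fun t => t ++ [frame]))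
    PySem.Dict.empty

-- Source B's dict comprehension with the adjacent-pair scan
-- all(b == a + 1 for a, b in zip(ids-of-track, ids-of-track[1:]))
def valid_tracks_for_sequence_alt (annotations : List (List (String × Int))) :
    List (Int × List (List (String × Int))) :=
  (pvTracksAlt annotations).items.filter
    (fun p =>
      ((p.2.map (fun frame => pvFGet frame "rel_image_id")).zip
        ((PySem.List.slice p.2 (some 1) none).map (fun frame => pvFGet frame "rel_image_id"))).all
        (fun q => q.2 == q.1 + 1))

-- ===== PRECONDITION & SPEC =====

-- Pre_ excludes exactly the inputs on which the Python A raises KeyError: a frame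
-- without 'num_keypoints', or a kept frame (num_keypoints != 0) without 'track_id'
-- or 'rel_image_id'.
def Pre_valid_tracks_for_sequence (annotations : List (List (String × Int))) : Prop :=
  ∀ frame ∈ annotations,
    (PySem.Dict.mk frame).contains "num_keypoints" = true ∧
    ((PySem.Dict.mk frame).getD "num_keypoints" 0 ≠ 0 →
      (PySem.Dict.mk frame).contains "track_id" = true ∧
      (PySem.Dict.mk frame).contains "rel_image_id" = true)
instance (annotations : List (List (String × Int))) : Decidable (Pre_valid_tracks_for_sequence annotations) := by unfold Pre_valid_tracks_for_sequence; infer_instance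

def pvWitness_valid_tracks_for_sequence : (List (List (String × Int))) :=
  [[("num_keypoints", 2), ("track_id", 9), ("rel_image_id", 42)],
   [("num_keypoints", 6), ("track_id", 8), ("rel_image_id", 41)],
   [("num_keypoints", 6), ("track_id", 8), ("rel_image_id", 42)],
   [("num_keypoints", 6), ("track_id", 8), ("rel_image_id", 44)],
   [("num_keypoints", 0), ("extra", 3)]]

def Spec_valid_tracks_for_sequence (annotations : List (List (String × Int))) (out : List (Int × List (List (String × Int)))) : Prop := out = valid_tracks_for_sequence_alt annotations
instance (annotations : List (List (String × Int))) (out : List (Int × List (List (String × Int)))) : Decidable (Spec_valid_tracks_for_sequence annotations out) := by unfold Spec_valid_tracks_for_sequence; infer_instance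

-- ===== CLAIM (what is proved, stated in full; the proofs are below) =====
def Claim_equal_valid_tracks_for_sequence : Prop := ∀ (annotations : List (List (String × Int))), Dom_valid_tracks_for_sequence annotations → Pre_valid_tracks_for_sequence annotations → Spec_valid_tracks_for_sequence annotations (valid_tracks_for_sequence annotations)

-- ===== LEMMAS AND PROOFS =====

-- B's adjacent-pair test, abstracted over the id list
def pvConsec (ids : List Int) : Bool :=
  (ids.zip ids.tail).all (fun q => q.2 == q.1 + 1)

-- the arithmetic-progression normal form both tests characterise
def pvArith (a : Int) (n : Nat) : List Int :=
  (List.range n).map (fun (k : Nat) => a + (k : Int))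

lemma pvArith_succ (a : Int) (n : Nat) :
    pvArith a (n + 1) = a :: pvArith (a + 1) n := by
  simp only [pvArith, List.range_succ_eq_map, List.map_cons, List.map_map, Nat.cast_zero, add_zero]
  congr 1
  apply List.map_congr_left
  intro k _
  simp only [Function.comp_apply, Nat.succ_eq_add_one]
  push_cast
  ring

lemma pvFoldlAdd_sub : ∀ (l s : List Int), ∃ r, List.foldl PySem.Set.add s l = s ++ r ∧ r.Sublist l := by
  intro l
  induction l with
  | nil => intro s; exact ⟨[], by simp, List.Sublist.refl _⟩
  | cons a t ih =>
    intro s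
    by_cases hm : a ∈ s
    · obtain ⟨r, hr, hs⟩ := ih s
      refine ⟨r, ?_, hs.cons a⟩
      simpa [PySem.Set.add, hm] using hr
    · obtain ⟨r, hr, hs⟩ := ih (s ++ [a])
      refine ⟨a :: r, ?_, hs.cons₂ a⟩
      simp only [List.foldl_cons, PySem.Set.add]
      rw [if_neg (by simpa using hm)]
      simpa using hr

lemma pvOfList_sublist (l : List Int) : (PySem.Set.ofList l).Sublist l := by
  obtain ⟨r, hr, hs⟩ := pvFoldlAdd_sub l []
  have h2 : PySem.Set.ofList l = r := by simpa [PySem.Set.ofList, PySem.Set.empty] using hr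
  rw [h2]; exact hs

lemma pvNodup_of_len (l : List Int) (h : (PySem.Set.ofList l).length = l.length) : l.Nodup := by
  have h2 := (pvOfList_sublist l).eq_of_length h
  rw [← h2]; exact PySem.Set.nodup_ofList l

lemma pvFoldlAdd_nodup : ∀ (l s : List Int), l.Nodup → (∀ x ∈ l, ¬ x ∈ s) →
    List.foldl PySem.Set.add s l = s ++ l := by
  intro l
  induction l with
  | nil => simp
  | cons a t ih =>
    intro s hnd hdis
    simp only [List.foldl_cons, PySem.Set.add]
    rw [if_neg (by simpa using hdis a (by simp))]
    rw [ih (s ++ [a]) (List.nodup_cons.mp hnd).2 ?_]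
    · simp
    · intro x hx
      simp only [List.mem_append, List.mem_singleton]
      rintro (h | h)
      · exact hdis x (by simp [hx]) h
      · exact (List.nodup_cons.mp hnd).1 (h ▸ hx)

lemma pvOfList_eq_self (l : List Int) (h : l.Nodup) : PySem.Set.ofList l = l := by
  simpa [PySem.Set.ofList, PySem.Set.empty] using pvFoldlAdd_nodup l [] h (by simp)

lemma pvGap (l : List Int) (hp : l.Pairwise (· < ·)) :
    ∀ (d i : Nat) (h : i + d < l.length), l[i] + (d : Int) ≤ l[i + d] := by
  intro d
  induction d with
  | zero => intro i h; simp
  | succ d ih =>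
    intro i h
    have h1 := ih i (by omega)
    have h2 : l[i + d] < l[i + d + 1] := by
      exact List.pairwise_iff_getElem.mp hp (i+d) (i+d+1) (by omega) (by omega) (by omega)
    have h3 : l[i + (d + 1)] = l[i + d + 1]'(by omega) := by
      exact getElem_congr rfl (by omega) (by omega)
    rw [h3]
    push_cast
    omega

lemma pvArith_getLast? (a : Int) (m : Nat) :
    (pvArith a (m + 1)).getLast? = some (a + m) := by
  simp [pvArith, List.range_succ]

lemma pvArith_nodup (a : Int) (n : Nat) : (pvArith a n).Nodup := by
  refine List.Nodup.map ?_ List.nodup_range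
  intro x y h
  dsimp only at h
  omega

lemma pvArith_pairwise (a : Int) (n : Nat) : (pvArith a n).Pairwise (· ≤ ·) := by
  refine List.Pairwise.map _ ?_ List.pairwise_lt_range
  intro x y h
  dsimp only
  omega

lemma pvCheckA_unfold (a : Int) (t : List Int) :
    pvCheckA (a :: t) = true ↔
      ((a :: t).length = (PySem.Set.ofList (a :: t)).length ∧
       a :: t = PySem.List.sorted (a :: t) (fun x => x) ∧
       ((a :: t).length : Int) = ((a :: t).getLast?.getD 0) - a + 1) := by
  have hL : (a :: t).getLast? = some ((a :: t).getLast (by simp)) :=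
    List.getLast?_eq_some_getLast _
  simp [pvCheckA, PySem.List.pyGet?_neg_one, hL, and_assoc]

lemma pvCheckA_iff (a : Int) (t : List Int) :
    pvCheckA (a :: t) = true ↔ a :: t = pvArith a (t.length + 1) := by
  rw [pvCheckA_unfold]
  constructor
  · rintro ⟨h1, h2, h3⟩
    have hnd : (a :: t).Nodup := pvNodup_of_len _ h1.symm
    have hple : (a :: t).Pairwise (· ≤ ·) := by
      have := PySem.List.sorted_pairwise (a :: t) (fun x => x)
      rw [← h2] at this
      exact this
    have hplt : (a :: t).Pairwise (· < ·) :=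
      (hple.and hnd).imp (fun h => lt_of_le_of_ne h.1 h.2)
    have hlen : (a :: t).length = t.length + 1 := by simp
    have hlast2 : (a :: t).getLast?.getD 0 = (a :: t)[(a :: t).length - 1]'(by omega) := by
      rw [List.getLast?_eq_some_getLast (l := a :: t) (by simp)]
      simp only [Option.getD_some]
      exact List.getLast_eq_getElem _
    rw [hlast2] at h3
    apply List.ext_getElem (by simp [pvArith])
    intro i hi hi2
    have hlow : (a : Int) + i ≤ (a :: t)[i] := by
      have := pvGap _ hplt i 0 (by omega)
      simpa using this
    have hhigh : (a :: t)[i] ≤ (a : Int) + i := by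
      have hb : i + ((a :: t).length - 1 - i) < (a :: t).length := by omega
      have hg := pvGap _ hplt ((a :: t).length - 1 - i) i hb
      have hidx : (a :: t)[i + ((a :: t).length - 1 - i)]'hb
          = (a :: t)[(a :: t).length - 1]'(by omega) :=
        getElem_congr rfl (by omega) _
      rw [hidx] at hg
      have hc : (((a :: t).length - 1 - i : Nat) : Int) = (t.length : Int) - (i : Int) := by
        have hn : (a :: t).length - 1 - i = t.length - i := by omega
        rw [hn]
        omega
      rw [hc] at hg
      omega
    have harith : (pvArith a (t.length + 1))[i]'(by simpa [pvArith] using hi) = a + i := by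
      simp [pvArith]
    rw [harith]
    omega
  · intro h
    rw [h]
    have hnd := pvArith_nodup a (t.length + 1)
    refine ⟨by rw [pvOfList_eq_self _ hnd], ?_, ?_⟩
    · rw [PySem.List.sorted_eq_self_of_pairwise _ _ ?_]
      exact (pvArith_pairwise a (t.length + 1)).imp (fun h => h)
    · rw [pvArith_getLast?]
      simp [pvArith]

lemma pvConsec_iff (a : Int) (t : List Int) :
    pvConsec (a :: t) = true ↔ a :: t = pvArith a (t.length + 1) := by
  induction t generalizing a with
  | nil => simp [pvConsec, pvArith]
  | cons b t ih =>
    have h1 : pvConsec (a :: b :: t) = ((b == a + 1) && pvConsec (b :: t)) := by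
      simp [pvConsec]
    rw [pvArith_succ, h1]
    constructor
    · rintro h
      rcases Bool.and_eq_true_iff.mp h with ⟨hb, hc⟩
      have hb' : b = a + 1 := by simpa using hb
      have h2 := (ih b).mp hc
      rw [List.cons_eq_cons]
      exact ⟨rfl, by simpa [hb'] using h2⟩
    · intro h
      rcases List.cons_eq_cons.mp h with ⟨-, h2⟩
      have hlen : (b :: t) = pvArith (a+1) (t.length + 1) := by simpa using h2
      have hb : b = a + 1 := by
        rw [pvArith_succ] at hlen
        exact (List.cons_eq_cons.mp hlen).1
      apply Bool.and_eq_true_iff.mpr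
      exact ⟨by simp [hb], (ih b).mpr (by rw [hlen, hb])⟩

lemma pvSetdefault_modify {ν : Type} (d : PySem.Dict Int ν) (k : Int) (f : ν → ν) (v0 : ν) :
    (d.setdefault k v0).modify k v0 f = d.modify k v0 f := by
  by_cases hc : d.contains k = true
  · rw [PySem.Dict.setdefault_of_contains d v0 hc]
  · have hc' : d.contains k = false := by simpa using hc
    have hall : ∀ p ∈ d.items, (p.1 == k) = false := by
      have h0 := hc'
      simp only [PySem.Dict.contains, List.any_eq_false] at h0
      intro p hp
      simpa using h0 p hp
    have hfind : List.find? (fun p => p.1 == k) d.items = none :=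
      List.find?_eq_none.mpr (fun p hp => by simp [hall p hp])
    have hgetD : d.getD k v0 = v0 := by
      simp [PySem.Dict.getD, PySem.Dict.get?, hfind]
    have hsd : d.setdefault k v0 = PySem.Dict.mk (d.items ++ [(k, v0)]) := by
      simp [PySem.Dict.setdefault, hc']
    have hcontains2 : (PySem.Dict.mk (d.items ++ [(k, v0)])).contains k = true := by
      simp [PySem.Dict.contains]
    have hfind2 : List.find? (fun p => p.1 == k) (d.items ++ [(k, v0)]) = some (k, v0) := by
      rw [List.find?_append, hfind]
      simp
    have hgetD2 : (PySem.Dict.mk (d.items ++ [(k, v0)])).getD k v0 = v0 := by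
      simp [PySem.Dict.getD, PySem.Dict.get?, hfind2]
    rw [hsd]
    show PySem.Dict.insert _ k (f ((PySem.Dict.mk (d.items ++ [(k, v0)])).getD k v0))
        = PySem.Dict.insert d k (f (d.getD k v0))
    rw [hgetD2, hgetD]
    apply PySem.Dict.ext
    simp only [PySem.Dict.insert, hcontains2, hc', if_true, Bool.false_eq_true, if_false]
    simp only [List.map_append]
    rw [List.map_congr_left (l := d.items)
      (g := fun p => p) (fun p hp => by simp [hall p hp])]
    simp

lemma pvTracksAlt_eq (annotations : List (List (String × Int))) :
    pvTracksAlt annotations = pvTracksFor annotations := by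
  unfold pvTracksAlt pvTracksFor
  congr 1
  funext tracks frame
  by_cases h : (pvFGet frame "num_keypoints" == 0) = true
  · simp [h]
  · simp only [h, Bool.false_eq_true, if_false]
    exact pvSetdefault_modify tracks (pvFGet frame "track_id") _ []

def pvPairs (annotations : List (List (String × Int))) : List (Int × List (String × Int)) :=
  (annotations.filter (fun f => !(pvFGet f "num_keypoints" == 0))).map
    (fun f => (pvFGet f "track_id", f))

lemma pvTracksFor_pairs (annotations : List (List (String × Int))) :
    pvTracksFor annotations
      = (pvPairs annotations).foldl
          (fun d p => d.modify p.1 [] (fun t => t ++ [p.2])) PySem.Dict.empty := by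
  unfold pvTracksFor pvPairs
  rw [List.foldl_map, List.foldl_filter]
  congr 1
  funext d f
  by_cases h : (pvFGet f "num_keypoints" == 0) = true <;> simp [h]

lemma pvTracks_keys_nodup' (annotations : List (List (String × Int))) :
    (pvTracksFor annotations).keys.Nodup := by
  rw [pvTracksFor_pairs]
  exact PySem.Dict.nodup_keys_foldl_modify_key (pvPairs annotations) Prod.fst []
    (fun _ p => fun t => t ++ [p.2]) PySem.Dict.empty (by simp [PySem.Dict.keys, PySem.Dict.empty])

lemma pvTracks_keys_nodup (annotations : List (List (String × Int))) :
    ((pvTracksFor annotations).items.map Prod.fst).Nodup := by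
  have := pvTracks_keys_nodup' annotations
  simpa [PySem.Dict.keys] using this

lemma pvTracks_items (annotations : List (List (String × Int))) :
    ∀ p ∈ (pvTracksFor annotations).items, p.2 ≠ [] := by
  intro p hp
  have hnd := pvTracks_keys_nodup' annotations
  have hp' : (p.1, p.2) ∈ (pvTracksFor annotations).items := by
    rw [Prod.mk.eta]; exact hp
  have hval : (pvTracksFor annotations).getD p.1 [] = p.2 :=
    PySem.Dict.getD_of_mem_items _ hp' hnd []
  have hkmem : p.1 ∈ (pvTracksFor annotations).keys :=
    PySem.Dict.mem_keys_of_mem_items _ hp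
  have hkeys : (pvTracksFor annotations).keys
      = PySem.Set.update (PySem.Dict.empty : PySem.Dict Int (List (List (String × Int)))).keys ((pvPairs annotations).map Prod.fst) := by
    rw [pvTracksFor_pairs]
    exact PySem.Dict.keys_foldl_modify_key (pvPairs annotations) Prod.fst []
      (fun _ p => fun t => t ++ [p.2]) PySem.Dict.empty
  rw [hkeys] at hkmem
  have hmem2 : p.1 ∈ (pvPairs annotations).map Prod.fst := by
    rcases (PySem.Set.mem_update _ _ _).mp hkmem with h | h
    · simp [PySem.Dict.keys, PySem.Dict.empty] at h
    · exact h
  obtain ⟨q, hq, hq1⟩ := List.mem_map.mp hmem2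
  have hgd : (pvTracksFor annotations).getD p.1 []
      = PySem.Dict.empty.getD p.1 []
        ++ ((pvPairs annotations).filter (fun r => r.1 == p.1)).map (fun r => r.2) := by
    rw [pvTracksFor_pairs]
    exact PySem.Dict.getD_foldl_modify_append (pvPairs annotations) PySem.Dict.empty p.1
  have hqf : q ∈ (pvPairs annotations).filter (fun r => r.1 == p.1) :=
    List.mem_filter.mpr ⟨hq, by simp [hq1]⟩
  have hne : ((pvPairs annotations).filter (fun r => r.1 == p.1)).map (fun r => r.2) ≠ [] := by
    intro hcon
    exact absurd (List.mem_map_of_mem hqf (f := fun r => r.2)) (by simp [hcon])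
  rw [hval] at hgd
  intro hcon
  rw [hcon] at hgd
  have : PySem.Dict.empty.getD p.1 ([] : List (List (String × Int)))
      ++ ((pvPairs annotations).filter (fun r => r.1 == p.1)).map (fun r => r.2) = [] := hgd.symm
  rcases List.append_eq_nil_iff.mp this with ⟨-, h2⟩
  exact hne h2

lemma pvFoldl_insert_items {ν : Type} (q : Int × ν → Bool) :
    ∀ (l : List (Int × ν)) (d : PySem.Dict Int ν),
      (∀ p ∈ l, d.contains p.1 = false) → (l.map Prod.fst).Nodup →
      (l.foldl (fun v p => if q p then v.insert p.1 p.2 else v) d).items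
        = d.items ++ l.filter q := by
  intro l
  induction l with
  | nil => intro d _ _; simp
  | cons p t ih =>
    intro d hfresh hnd
    simp only [List.foldl_cons]
    by_cases hq : q p = true
    · rw [if_pos hq]
      have hnd' : (p.1 :: t.map Prod.fst).Nodup := by
        rw [List.map_cons] at hnd; exact hnd
      have hni : (d.insert p.1 p.2).items = d.items ++ [(p.1, p.2)] :=
        PySem.Dict.items_insert_of_not_contains d p.2 (hfresh p (by simp))
      rw [ih (d.insert p.1 p.2) ?_ (List.nodup_cons.mp hnd').2, List.filter_cons, if_pos hq, hni]
      · simp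
      · intro r hr
        rw [PySem.Dict.contains_insert]
        have h1 : (r.1 == p.1) = false := by
          have h2 := (List.nodup_cons.mp hnd').1
          simp only [beq_eq_false_iff_ne, ne_eq]
          intro hcon
          exact h2 (by rw [← hcon]; exact List.mem_map_of_mem hr (f := Prod.fst))
        rw [h1, hfresh r (by simp [hr])]
        rfl
    · rw [if_neg hq,
        ih d (fun r hr => hfresh r (by simp [hr]))
          (by rw [List.map_cons] at hnd; exact hnd.of_cons),
        List.filter_cons, if_neg hq]

lemma pvCheckA_eq_consec (a : Int) (t : List Int) :
    pvCheckA (a :: t) = pvConsec (a :: t) := by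
  rcases h1 : pvCheckA (a :: t) <;> rcases h2 : pvConsec (a :: t) <;> try rfl
  · exact absurd ((pvCheckA_iff a t).mpr ((pvConsec_iff a t).mp h2)) (by simp [h1])
  · exact absurd ((pvConsec_iff a t).mpr ((pvCheckA_iff a t).mp h1)) (by simp [h2])

-- ===== VERDICT (by name: the statement is the Claim_ definition above) =====
theorem valid_tracks_for_sequence_spec : Claim_equal_valid_tracks_for_sequence := by
  intro annotations _ _
  unfold Spec_valid_tracks_for_sequence
  unfold valid_tracks_for_sequence valid_tracks_for_sequence_alt
  rw [pvTracksAlt_eq,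
      pvFoldl_insert_items _ _ _ (by simp [PySem.Dict.contains_empty]) (pvTracks_keys_nodup annotations)]
  show [] ++ _ = _
  rw [List.nil_append]
  apply List.filter_congr
  intro p hp
  rcases hv : p.2 with _ | ⟨f0, fs⟩
  · exact absurd hv (pvTracks_items annotations p hp)
  · rw [PySem.List.slice_from_one]
    have h := pvCheckA_eq_consec (pvFGet f0 "rel_image_id")
      (fs.map (fun frame => pvFGet frame "rel_image_id"))
    simpa [pvConsec] using h
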